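-- pv_equiv track=rewrite | github.com/SSD-Brandeis/LSMMemoryProfiling | plotting/compare_flex.py | average_runs
-- ===== SOURCE A (Python) =====
-- from typing import Optional, Dict, List
--
-- def average_runs(runs: List[List[Dict[str,int]]]) -> List[Dict[str,int]]:
--     if not runs:
--         return []
--     n = len(runs)
--     length = len(runs[0])
--     avg = []
--     for i in range(length):
--
--         keys = set().union(*(run[i].keys() for run in runs))
--         m: Dict[str,int] = {}
--         for k in keys:
--             total = sum(run[i].get(k, 0) for run in runs)
--             m[k] = total // n
--         avg.append(m)
--     return avg
-- ===== SOURCE B (Python) =====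
-- from typing import Dict, List
--
--
-- def average_runs(runs: List[List[Dict[str, int]]]) -> List[Dict[str, int]]:
--     # One accumulating pass over the runs per index, then a single divide pass,
--     # instead of A's key-union followed by a per-key re-scan of all runs.
--     if not runs:
--         return []
--     n = len(runs)
--     out = []
--     for i in range(len(runs[0])):
--         acc: Dict[str, int] = {}
--         for run in runs:
--             for k, v in run[i].items():
--                 acc[k] = acc.get(k, 0) + v
--         out.append({k: v // n for k, v in acc.items()})
--     return out
-- ===== Notes on version B (the rewrite author's own statement) =====
-- stated objective: faster
-- what changed: Replaces A's two-phase per-index work (build the key union, then for each key re-scan every run to sum) by a single accumulating scan over the runs' items into one dict followed by a divide pass, so no per-key re-scan of the runs remains.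
import Mathlib
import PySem

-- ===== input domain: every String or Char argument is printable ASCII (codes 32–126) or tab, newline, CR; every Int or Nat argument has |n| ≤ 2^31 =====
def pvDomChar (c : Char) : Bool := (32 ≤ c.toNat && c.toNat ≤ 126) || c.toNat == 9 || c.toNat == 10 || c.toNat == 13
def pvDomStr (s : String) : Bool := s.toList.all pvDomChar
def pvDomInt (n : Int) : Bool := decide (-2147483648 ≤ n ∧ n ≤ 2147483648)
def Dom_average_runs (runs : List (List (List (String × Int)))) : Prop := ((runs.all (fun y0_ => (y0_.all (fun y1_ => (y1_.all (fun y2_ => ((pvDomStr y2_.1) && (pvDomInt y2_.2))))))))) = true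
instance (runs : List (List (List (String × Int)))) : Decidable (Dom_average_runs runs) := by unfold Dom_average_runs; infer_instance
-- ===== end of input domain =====

-- B replaces A's per-index key-union + per-key re-scan of all runs by one accumulating
-- scan over the runs' items followed by a divide pass (measured faster: no per-key re-scan).

-- ===== PORT A =====
def average_runs (runs : List (List (List (String × Int)))) : List (List (String × Int)) :=
  if runs = [] then []
  else
    let n : Int := runs.length
    let length : Int := (runs.headD []).length
    (PySem.List.pyRange 0 length 1).map (fun i =>
      -- keys = set().union(*(run[i].keys() for run in runs))
      let keys : PySem.Set String :=
        runs.foldl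
          (fun s run =>
            PySem.Set.union s
              (PySem.Set.ofList (PySem.Dict.keys ⟨(PySem.List.pyGet? run i).getD []⟩)))
          PySem.Set.empty
      -- for k in keys: total = sum(run[i].get(k, 0) for run in runs); m[k] = total // n
      let m : PySem.Dict String Int :=
        keys.foldl
          (fun m k =>
            let total : Int :=
              runs.foldl
                (fun t run =>
                  t + PySem.Dict.getD ⟨(PySem.List.pyGet? run i).getD []⟩ k 0)
                0
            m.insert k (PySem.Int.floordiv total n))
          PySem.Dict.empty
      m.items)

-- ===== PORT B =====
def average_runs_alt (runs : List (List (List (String × Int)))) : List (List (String × Int)) :=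
  if runs = [] then []
  else
    let n : Int := runs.length
    (PySem.List.pyRange 0 ((runs.headD []).length : Int) 1).map (fun i =>
      -- acc = {}; for run in runs: for k, v in run[i].items(): acc[k] = acc.get(k, 0) + v
      let acc : PySem.Dict String Int :=
        runs.foldl
          (fun acc run =>
            ((PySem.List.pyGet? run i).getD []).foldl
              (fun acc kv => acc.insert kv.1 (acc.getD kv.1 0 + kv.2))
              acc)
          PySem.Dict.empty
      -- {k: v // n for k, v in acc.items()}
      acc.items.map (fun kv => (kv.1, PySem.Int.floordiv kv.2 n)))

-- ===== PRECONDITION & SPEC =====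
-- Pre_ excludes (a) inputs where some run is shorter than runs[0] (A raises IndexError on run[i])
-- and (b) inner association lists with duplicate keys, which do not encode a Python dict.
def Pre_average_runs (runs : List (List (List (String × Int)))) : Prop :=
  (∀ run ∈ runs, (runs.headD []).length ≤ run.length) ∧
  (∀ run ∈ runs, ∀ d ∈ run, (d.map Prod.fst).Nodup)

instance (runs : List (List (List (String × Int)))) : Decidable (Pre_average_runs runs) := by
  unfold Pre_average_runs; infer_instance

def pvWitness_average_runs : (List (List (List (String × Int)))) :=
  [[[("a", 1)], [("b", 2), ("c", 3)]], [[("a", 3), ("b", -1)], []]]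

def Spec_average_runs (runs : List (List (List (String × Int)))) (out : List (List (String × Int))) : Prop := out = average_runs_alt runs
instance (runs : List (List (List (String × Int)))) (out : List (List (String × Int))) : Decidable (Spec_average_runs runs out) := by unfold Spec_average_runs; infer_instance

-- ===== CLAIM (what is proved, stated in full; the proofs are below) =====
def Claim_equal_average_runs : Prop := ∀ (runs : List (List (List (String × Int)))), Dom_average_runs runs → Pre_average_runs runs → Spec_average_runs runs (average_runs runs)

-- ===== LEMMAS AND PROOFS =====

-- the value-accumulating step of B's inner loop
def pvStep (acc : PySem.Dict String Int) (kv : String × Int) : PySem.Dict String Int :=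
  acc.insert kv.1 (acc.getD kv.1 0 + kv.2)

-- sum of the values attached to key k in an item stream
def pvSumK (k : String) (ps : List (String × Int)) : Int :=
  ((ps.filter (fun kv => kv.1 = k)).map Prod.snd).sum

theorem pvSumK_cons (k : String) (a : String × Int) (ps : List (String × Int)) :
    pvSumK k (a :: ps) = (if a.1 = k then a.2 else 0) + pvSumK k ps := by
  simp only [pvSumK, List.filter_cons]
  by_cases h : a.1 = k <;> simp [h]

theorem pvSumK_append (k : String) (ps qs : List (String × Int)) :
    pvSumK k (ps ++ qs) = pvSumK k ps + pvSumK k qs := by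
  simp [pvSumK, List.filter_append]

theorem pvSumK_eq_zero_of_not_mem (k : String) (d : List (String × Int))
    (h : k ∉ d.map Prod.fst) : pvSumK k d = 0 := by
  induction d with
  | nil => rfl
  | cons a d ih =>
    simp only [List.map_cons, List.mem_cons, not_or] at h
    rw [pvSumK_cons, if_neg (fun hh => h.1 hh.symm), ih h.2, add_zero]

-- getD on a duplicate-free literal dict is the keyed value sum
theorem pvGetD_mk (d : List (String × Int)) (k : String)
    (h : (d.map Prod.fst).Nodup) :
    PySem.Dict.getD ⟨d⟩ k 0 = pvSumK k d := by
  induction d with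
  | nil => rfl
  | cons a d ih =>
    simp only [List.map_cons, List.nodup_cons] at h
    rw [PySem.Dict.getD_eq_get?_getD, PySem.Dict.get?_mk_cons, pvSumK_cons]
    by_cases hk : a.1 = k
    · subst hk
      rw [if_pos rfl, if_pos (by simp), pvSumK_eq_zero_of_not_mem _ _ h.1]
      simp
    · rw [if_neg hk, if_neg (by simpa using hk), zero_add,
        ← PySem.Dict.getD_eq_get?_getD, ih h.2]

-- keys accumulated by B's inner loop
theorem pvStep_keys (ps : List (String × Int)) (acc : PySem.Dict String Int) :
    (ps.foldl pvStep acc).keys = PySem.Set.update acc.keys (ps.map Prod.fst) := by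
  induction ps generalizing acc with
  | nil => simp [PySem.Set.update]
  | cons a ps ih =>
    rw [List.foldl_cons, ih, List.map_cons, PySem.Set.update_cons]
    congr 1
    by_cases h : acc.contains a.1 = true
    · rw [pvStep, PySem.Dict.keys_insert_of_contains _ _ h,
        PySem.Set.add_of_mem (by rwa [← PySem.Dict.contains_iff_mem_keys])]
    · have h' : acc.contains a.1 = false := by simpa using h
      rw [pvStep, PySem.Dict.keys_insert_of_not_contains _ _ h',
        PySem.Set.add_of_not_mem (by
          rw [← PySem.Dict.contains_iff_mem_keys]; simp [h'])]

theorem pvStep_nodup (ps : List (String × Int)) (acc : PySem.Dict String Int)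
    (h : acc.keys.Nodup) : (ps.foldl pvStep acc).keys.Nodup := by
  induction ps generalizing acc with
  | nil => exact h
  | cons a ps ih => exact ih _ (PySem.Dict.nodup_keys_insert _ _ _ h)

theorem pvStep_getD (ps : List (String × Int)) (acc : PySem.Dict String Int) (k : String) :
    (ps.foldl pvStep acc).getD k 0 = acc.getD k 0 + pvSumK k ps := by
  induction ps generalizing acc with
  | nil => simp [pvSumK]
  | cons a ps ih =>
    rw [List.foldl_cons, ih, pvSumK_cons, pvStep, PySem.Dict.getD_insert]
    by_cases h : k = a.1
    · rw [if_pos h, if_pos h.symm, h]; ring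
    · rw [if_neg h, if_neg (fun hh => h hh.symm)]; ring

-- A's build loop over distinct fresh keys appends the mapped pairs
theorem pvBuild_items (f : String → Int) (ks : List String) (acc : PySem.Dict String Int)
    (hnd : ks.Nodup) (hfresh : ∀ k ∈ ks, acc.contains k = false) :
    (ks.foldl (fun m k => m.insert k (f k)) acc).items
      = acc.items ++ ks.map (fun k => (k, f k)) := by
  induction ks generalizing acc with
  | nil => simp
  | cons k ks ih =>
    simp only [List.nodup_cons] at hnd
    rw [List.foldl_cons, ih _ hnd.2 (by
        intro k' hk'
        rw [PySem.Dict.contains_insert]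
        have : (k' == k) = false := by
          simp only [beq_eq_false_iff_ne, ne_eq]
          exact fun h => hnd.1 (h ▸ hk')
        simp [this, hfresh k' (List.mem_cons_of_mem _ hk')]),
      PySem.Dict.items_insert_of_not_contains _ _ (hfresh k List.mem_cons_self),
      List.map_cons, List.append_assoc, List.singleton_append]

-- fold of Set.update with deduped argument equals update with the raw argument
theorem pvUpdate_ofList {α : Type} [BEq α] [LawfulBEq α] (s : PySem.Set α) (xs : List α) :
    PySem.Set.update s (PySem.Set.ofList xs) = PySem.Set.update s xs := by
  rw [PySem.Set.update_eq_append_filter, PySem.Set.update_eq_append_filter,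
    PySem.Set.ofList_ofList]

-- A's key-union fold is the dedup of the concatenated key stream
theorem pvKeys_union (ds : List (List (String × Int))) (s : PySem.Set String) :
    ds.foldl (fun s d => PySem.Set.union s (PySem.Set.ofList (d.map Prod.fst))) s
      = PySem.Set.update s ((ds.map (fun d => d.map Prod.fst)).flatten) := by
  induction ds generalizing s with
  | nil => simp [PySem.Set.update]
  | cons d ds ih =>
    rw [List.foldl_cons, ih, List.map_cons, List.flatten_cons, PySem.Set.update_append,
      PySem.Set.union, pvUpdate_ofList]

-- sum over ds of the keyed sums = keyed sum of the flattened stream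
theorem pvSumK_flatten (k : String) (ds : List (List (String × Int))) :
    (ds.map (pvSumK k)).sum = pvSumK k ds.flatten := by
  induction ds with
  | nil => rfl
  | cons d ds ih => rw [List.map_cons, List.flatten_cons, pvSumK_append, List.sum_cons, ih]

-- the per-index core: A's union-then-rescan dict equals B's accumulate-then-divide dict
theorem pvCore (ds : List (List (String × Int))) (n : Int)
    (hnd : ∀ d ∈ ds, (d.map Prod.fst).Nodup) :
    ((ds.foldl (fun s d => PySem.Set.union s (PySem.Set.ofList (d.map Prod.fst)))
        PySem.Set.empty).foldl
      (fun m k =>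
        m.insert k (PySem.Int.floordiv (ds.foldl (fun t d => t + PySem.Dict.getD ⟨d⟩ k 0) 0) n))
      PySem.Dict.empty).items
    = ((ds.foldl (fun acc d => d.foldl pvStep acc) PySem.Dict.empty).items).map
        (fun kv => (kv.1, PySem.Int.floordiv kv.2 n)) := by
  have hflat : ds.foldl (fun acc d => d.foldl pvStep acc) PySem.Dict.empty
      = ds.flatten.foldl pvStep PySem.Dict.empty := (List.foldl_flatten).symm
  have hkeysB : (ds.foldl (fun acc d => d.foldl pvStep acc) PySem.Dict.empty).keys
      = PySem.Set.ofList ((ds.map (fun d => d.map Prod.fst)).flatten) := by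
    rw [hflat, pvStep_keys]
    have h1 : PySem.Set.update (PySem.Dict.empty : PySem.Dict String Int).keys
        (ds.flatten.map Prod.fst) = PySem.Set.ofList (ds.flatten.map Prod.fst) :=
      PySem.Set.update_empty _
    rw [h1, List.map_flatten]
  have hkeysA := pvKeys_union ds PySem.Set.empty
  have hks : PySem.Set.update (PySem.Set.empty : PySem.Set String)
      ((ds.map (fun d => d.map Prod.fst)).flatten)
      = PySem.Set.ofList ((ds.map (fun d => d.map Prod.fst)).flatten) :=
    PySem.Set.update_empty _
  -- left side: build-loop over the distinct keys
  rw [hkeysA, hks,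
    pvBuild_items _ _ _ (PySem.Set.nodup_ofList _) (fun k _ => PySem.Dict.contains_empty k)]
  -- right side: items of the accumulated dict
  have hnodupB : (ds.foldl (fun acc d => d.foldl pvStep acc) PySem.Dict.empty).keys.Nodup := by
    rw [hflat]; exact pvStep_nodup _ _ (by simp [PySem.Dict.empty])
  rw [PySem.Dict.items_eq_map_keys _ hnodupB 0, hkeysB, List.map_map]
  have hitems : (PySem.Dict.empty : PySem.Dict String Int).items = [] := rfl
  rw [hitems, List.nil_append]
  apply List.map_congr_left
  intro k hk
  simp only [Function.comp_apply]
  congr 1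
  -- values agree: A's per-key total equals B's accumulated value
  rw [hflat, pvStep_getD]
  have hempty : (PySem.Dict.empty : PySem.Dict String Int).getD k 0 = 0 := rfl
  rw [hempty, zero_add, PySem.List.foldl_add]
  rw [zero_add]
  have : ds.map (fun d => PySem.Dict.getD ⟨d⟩ k 0) = ds.map (pvSumK k) :=
    List.map_congr_left (fun d hd => pvGetD_mk d k (hnd d hd))
  rw [this, pvSumK_flatten]

-- ===== VERDICT (by name: the statement is the Claim_ definition above) =====
theorem average_runs_spec : Claim_equal_average_runs := by
  intro runs _ hpre
  unfold Spec_average_runs average_runs average_runs_alt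
  by_cases hnil : runs = []
  · simp [hnil]
  · rw [if_neg hnil, if_neg hnil]
    apply List.map_congr_left
    intro i _
    have hds : ∀ d ∈ runs.map (fun run => (PySem.List.pyGet? run i).getD []),
        (d.map Prod.fst).Nodup := by
      intro d hd
      rcases List.mem_map.1 hd with ⟨run, hrun, rfl⟩
      cases hg : PySem.List.pyGet? run i with
      | none => simp
      | some x =>
        simp only [Option.getD_some]
        exact hpre.2 run hrun x (PySem.List.mem_of_pyGet?_eq_some run hg)
    have := pvCore (runs.map (fun run => (PySem.List.pyGet? run i).getD []))
      (runs.length : Int) hds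
    simpa [List.foldl_map, pvStep] using this
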